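-- pv_equiv track=rewrite | github.com/rmizuta3/pyo3_sample | salesman.py | make_distance_table
-- ===== SOURCE A (Python) =====
-- def make_distance_table(places):
--     #マンハッタン距離のテーブルを作成
--     distance_table = [[0 for _ in range(len(places))] for _ in range(len(places))]
--     for i in range(len(places)):
--         for j in range(len(places)):
--             dist = abs(places[i][0]-places[j][0]) + \
--                 abs(places[i][1]-places[j][1])
--             distance_table[i][j] = dist
--     return distance_table
-- ===== SOURCE B (Python) =====
-- def make_distance_table(places):
--     # Compute each unordered pair's Manhattan distance once (upper triangle),
--     # then assemble full rows by reflecting the triangle; diagonal is 0.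
--     n = len(places)
--     upper = [[abs(places[i][0] - places[j][0]) + abs(places[i][1] - places[j][1])
--               for j in range(i + 1, n)]
--              for i in range(n)]
--     return [[upper[j][i - j - 1] for j in range(i)] + [0] + upper[i]
--             for i in range(n)]
-- ===== Notes on version B (the rewrite author's own statement) =====
-- stated objective: alternative
-- what changed: Instead of computing the Manhattan distance for every ordered pair (i,j) in a full n*n double loop over a preallocated matrix, B computes each unordered pair's distance once into an upper-triangle list of lists and assembles each full row as reflected-triangle prefix + [0] + own triangle row, exploiting symmetry of the metric.
import Mathlib
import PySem

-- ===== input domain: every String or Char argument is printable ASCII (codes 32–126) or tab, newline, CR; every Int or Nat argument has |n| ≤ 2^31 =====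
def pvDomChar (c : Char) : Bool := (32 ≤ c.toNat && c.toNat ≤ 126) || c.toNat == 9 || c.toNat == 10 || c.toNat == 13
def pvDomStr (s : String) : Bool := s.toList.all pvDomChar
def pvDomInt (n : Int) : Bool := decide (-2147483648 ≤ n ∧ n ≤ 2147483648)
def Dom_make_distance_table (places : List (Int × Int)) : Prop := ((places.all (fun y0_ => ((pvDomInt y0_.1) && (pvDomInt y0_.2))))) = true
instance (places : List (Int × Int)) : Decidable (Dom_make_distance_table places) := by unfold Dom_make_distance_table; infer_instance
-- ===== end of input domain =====

-- B computes each unordered pair's Manhattan distance once (upper triangle) and assembles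
-- rows by reflection, exploiting symmetry, instead of A's full n×n double loop over a mutated matrix.

-- ===== PORT A =====
def make_distance_table (places : List (Int × Int)) : List (List Int) :=
  let n : Int := places.length
  let distance_table : List (List Int) :=
    (PySem.List.pyRange 0 n 1).map (fun _ => (PySem.List.pyRange 0 n 1).map (fun _ => (0 : Int)))
  (PySem.List.pyRange 0 n 1).foldl (fun table i =>
    (PySem.List.pyRange 0 n 1).foldl (fun table j =>
      let pi := PySem.List.pyGetD places i ((0 : Int), (0 : Int))
      let pj := PySem.List.pyGetD places j ((0 : Int), (0 : Int))
      let dist := |pi.1 - pj.1| + |pi.2 - pj.2|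
      PySem.List.pySetD table i (PySem.List.pySetD (PySem.List.pyGetD table i []) j dist))
      table) distance_table

-- ===== PORT B =====
def make_distance_table_alt (places : List (Int × Int)) : List (List Int) :=
  let n : Int := places.length
  let upper : List (List Int) :=
    (PySem.List.pyRange 0 n 1).map (fun i =>
      (PySem.List.pyRange (i + 1) n 1).map (fun j =>
        let pi := PySem.List.pyGetD places i ((0 : Int), (0 : Int))
        let pj := PySem.List.pyGetD places j ((0 : Int), (0 : Int))
        |pi.1 - pj.1| + |pi.2 - pj.2|))
  (PySem.List.pyRange 0 n 1).map (fun i =>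
    ((PySem.List.pyRange 0 i 1).map (fun j =>
        PySem.List.pyGetD (PySem.List.pyGetD upper j []) (i - j - 1) 0))
      ++ [(0 : Int)] ++ PySem.List.pyGetD upper i [])

-- ===== PRECONDITION & SPEC =====
def Spec_make_distance_table (places : List (Int × Int)) (out : List (List Int)) : Prop := out = make_distance_table_alt places
instance (places : List (Int × Int)) (out : List (List Int)) : Decidable (Spec_make_distance_table places out) := by unfold Spec_make_distance_table; infer_instance

-- ===== CLAIM (what is proved, stated in full; the proofs are below) =====
def Claim_equal_make_distance_table : Prop := ∀ (places : List (Int × Int)), Dom_make_distance_table places → Spec_make_distance_table places (make_distance_table places)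

-- ===== LEMMAS AND PROOFS =====

-- the Manhattan distance between entries i and j, and the canonical full table
def pvD (places : List (Int × Int)) (i j : Nat) : Int :=
  |(places.getD i ((0 : Int), (0 : Int))).1 - (places.getD j ((0 : Int), (0 : Int))).1| +
  |(places.getD i ((0 : Int), (0 : Int))).2 - (places.getD j ((0 : Int), (0 : Int))).2|

def pvTbl (places : List (Int × Int)) : List (List Int) :=
  (List.range places.length).map (fun i => (List.range places.length).map (pvD places i))

theorem pvD_symm (places : List (Int × Int)) (i j : Nat) : pvD places i j = pvD places j i := by
  unfold pvD; rw [abs_sub_comm, abs_sub_comm ((places.getD i (0,0)).2)]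

theorem pvD_self (places : List (Int × Int)) (i : Nat) : pvD places i i = 0 := by
  simp [pvD]

theorem pvTakeSet {α : Type} (r : List α) (a : Nat) (v : α) (h : a < r.length) :
    (r.set a v).take (a + 1) = r.take a ++ [v] := by
  rw [List.take_add_one, List.take_set, List.set_eq_of_length_le (by simp),
      List.getElem?_set_self h]
  rfl

theorem pvRowfill (f : Nat → Int) :
    ∀ (k a : Nat) (r : List Int), r.length = a + k →
      (List.range' a k).foldl (fun r j => r.set j (f j)) r = r.take a ++ (List.range' a k).map f := by
  intro k
  induction k with
  | zero =>
    intro a r h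
    simp only [List.range'_zero, List.foldl_nil, List.map_nil, List.append_nil]
    rw [List.take_of_length_le (by omega)]
  | succ k ih =>
    intro a r h
    rw [List.range'_succ, List.foldl_cons, List.map_cons,
        ih (a + 1) (r.set a (f a)) (by simp; omega), pvTakeSet r a (f a) (by omega)]
    simp

theorem pvFoldRow (g : Nat → Int) (i : Nat) :
    ∀ (js : List Nat) (m : List (List Int)), i < m.length →
      js.foldl (fun m j => m.set i ((m.getD i []).set j (g j))) m
        = m.set i (js.foldl (fun r j => r.set j (g j)) (m.getD i [])) := by
  intro js
  induction js with
  | nil => intro m h; rw [List.foldl_nil, List.foldl_nil, List.getD_eq_getElem _ _ h,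
             List.set_getElem_self]
  | cons j js ih =>
    intro m h
    rw [List.foldl_cons, List.foldl_cons, ih _ (by simpa using h)]
    have hgd : (m.set i ((m.getD i []).set j (g j))).getD i [] = (m.getD i []).set j (g j) := by
      rw [List.getD_eq_getElem _ _ (by simpa using h), List.getElem_set_self]
    rw [hgd, List.set_set]

theorem pvOuter (g : Nat → Nat → Int) (N : Nat) :
    ∀ (k a : Nat) (m : List (List Int)), m.length = a + k → (∀ x ∈ m, x.length = N) →
      (List.range' a k).foldl (fun m i =>
          (List.range' 0 N).foldl (fun m j => m.set i ((m.getD i []).set j (g i j))) m) m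
        = m.take a ++ (List.range' a k).map (fun i => (List.range' 0 N).map (g i)) := by
  intro k
  induction k with
  | zero =>
    intro a m h _
    simp only [List.range'_zero, List.foldl_nil, List.map_nil, List.append_nil]
    rw [List.take_of_length_le (by omega)]
  | succ k ih =>
    intro a m h hrows
    have ha : a < m.length := by omega
    have hrow : (m.getD a []).length = N := by
      rw [List.getD_eq_getElem _ _ ha]; exact hrows _ (List.getElem_mem ha)
    rw [List.range'_succ, List.foldl_cons, List.map_cons,
        pvFoldRow (g a) a (List.range' 0 N) m ha,
        pvRowfill (g a) N 0 (m.getD a []) (by omega)]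
    simp only [List.take_zero, List.nil_append]
    rw [ih (a + 1) _ (by simp; omega)
        (by
          intro x hx
          rcases List.mem_or_eq_of_mem_set hx with hx | rfl
          · exact hrows _ hx
          · simp),
        pvTakeSet m a _ ha]
    simp

theorem pvOuter0 (g : Nat → Nat → Int) (N : Nat) (m : List (List Int))
    (h : m.length = N) (hrows : ∀ x ∈ m, x.length = N) :
    (List.range N).foldl (fun m i =>
        (List.range N).foldl (fun m j => m.set i ((m.getD i []).set j (g i j))) m) m
      = (List.range N).map (fun i => (List.range N).map (g i)) := by
  rw [List.range_eq_range', pvOuter g N N 0 m (by omega) hrows]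
  simp

theorem pvA_eq (places : List (Int × Int)) : make_distance_table places = pvTbl places := by
  unfold make_distance_table
  simp only [PySem.List.pyRange_zero_natCast, List.foldl_map, List.map_map,
    PySem.List.pySetD_natCast, PySem.List.pyGetD_natCast, Function.comp_def]
  rw [pvOuter0 _ places.length _ (by simp)
      (by intro x hx; rcases List.mem_map.1 hx with ⟨_, _, rfl⟩; simp)]
  simp [pvTbl, pvD]

theorem pvGetDNat (xs : List (Int × Int)) (d : Int × Int) (t : Int) (m : Nat) (h : t = (m : Int)) :
    PySem.List.pyGetD xs t d = xs.getD m d := by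
  subst h; exact PySem.List.pyGetD_natCast xs m d

theorem pvSplit (N i : Nat) (h : i < N) (f : Nat → Int) :
    (List.range N).map f
      = (List.range i).map f ++ [f i] ++ (List.range (N - i - 1)).map (fun k => f (i + 1 + k)) := by
  have h1 : N = i + (N - i - 1 + 1) := by omega
  conv_lhs => rw [h1, List.range_eq_range', ← List.range'_append]
  simp only [Nat.zero_add, Nat.one_mul]
  rw [List.range'_succ, List.map_append, List.map_cons, ← List.range_eq_range',
      List.range'_eq_map_range, List.map_map]
  simp [Function.comp_def]

theorem pvB_eq (places : List (Int × Int)) : make_distance_table_alt places = pvTbl places := by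
  unfold make_distance_table_alt pvTbl
  simp only [PySem.List.pyRange_zero_natCast, List.map_map, Function.comp_def]
  apply List.map_congr_left
  intro i hi
  have hiN : i < places.length := List.mem_range.1 hi
  simp only [PySem.List.pyGetD_natCast]
  conv_rhs => rw [pvSplit places.length i hiN (pvD places i)]
  rw [pvD_self]
  congr 1
  · congr 1
    apply List.map_congr_left
    intro j hj
    have hji : j < i := List.mem_range.1 hj
    rw [PySem.List.getD_map_range _ places.length j [] (by omega),
        show ((i : Int) - ↑j - 1) = ((i - j - 1 : Nat) : Int) from by omega,
        PySem.List.pyGetD_map_pyRange_one _ (↑j + 1) ↑places.length (i - j - 1) 0 (by omega),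
        show ((j : Int) + 1 + ↑(i - j - 1)) = ((i : Nat) : Int) from by omega]
    simp only [PySem.List.pyGetD_natCast]
    rw [pvD_symm]
    simp [pvD]
  · rw [PySem.List.getD_map_range _ places.length i [] hiN, PySem.List.pyRange_one, List.map_map,
        show ((places.length : Int) - (↑i + 1)).toNat = places.length - i - 1 from by omega]
    apply List.map_congr_left
    intro k hk
    simp only [Function.comp_def]
    rw [pvGetDNat places ((0 : Int), (0 : Int)) (↑i + 1 + ↑k) (i + 1 + k) (by push_cast; ring)]
    simp [pvD]

-- ===== VERDICT (by name: the statement is the Claim_ definition above) =====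
theorem make_distance_table_spec : Claim_equal_make_distance_table := by
  intro places _
  unfold Spec_make_distance_table
  rw [pvA_eq, pvB_eq]
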